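-- pv_equiv track=rewrite | github.com/dynamik-dev/bully | src/bully/config/parser.py | _parse_inline_list
-- ===== SOURCE A (Python) =====
-- def _strip_inline_comment(raw: str) -> str:
--     """Remove a trailing ` # comment` while respecting quoted regions."""
--     in_single = False
--     in_double = False
--     for i, ch in enumerate(raw):
--         if ch == "'" and not in_double:
--             in_single = not in_single
--         elif ch == '"' and not in_single:
--             in_double = not in_double
--         elif ch == "#" and not in_single and not in_double and (i == 0 or raw[i - 1].isspace()):
--             return raw[:i].rstrip()
--     return raw
--
-- _DOUBLE_QUOTED_ESCAPES: dict[str, str] = {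
--     "\\": "\\",
--     '"': '"',
--     "n": "\n",
--     "t": "\t",
--     "r": "\r",
--     "/": "/",
--     "0": "\x00",
-- }
--
-- def _unescape_double_quoted(inner: str) -> str:
--     """Apply YAML double-quoted escape processing to the inside of a scalar."""
--     if "\\" not in inner:
--         return inner
--     out: list[str] = []
--     i = 0
--     n = len(inner)
--     while i < n:
--         ch = inner[i]
--         if ch == "\\" and i + 1 < n:
--             nxt = inner[i + 1]
--             mapped = _DOUBLE_QUOTED_ESCAPES.get(nxt)
--             if mapped is not None:
--                 out.append(mapped)
--             else:
--                 out.append(ch)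
--                 out.append(nxt)
--             i += 2
--             continue
--         out.append(ch)
--         i += 1
--     return "".join(out)
--
-- def _parse_scalar(raw: str) -> str:
--     """Normalize a scalar value: strip inline comment, then process YAML quote escapes."""
--     raw = _strip_inline_comment(raw).strip()
--     if len(raw) >= 2 and raw[0] == '"' and raw[-1] == '"':
--         return _unescape_double_quoted(raw[1:-1])
--     if len(raw) >= 2 and raw[0] == "'" and raw[-1] == "'":
--         return raw[1:-1].replace("''", "'")
--     return raw
--
-- def _parse_inline_list(raw: str) -> list[str] | None:
--     """Parse `[a, b, "c"]` into a list of scalars, or return None if not a list."""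
--     raw = _strip_inline_comment(raw).strip()
--     if not (raw.startswith("[") and raw.endswith("]")):
--         return None
--     inner = raw[1:-1].strip()
--     if not inner:
--         return []
--     items: list[str] = []
--     buf: list[str] = []
--     in_single = False
--     in_double = False
--     for ch in inner:
--         if ch == "'" and not in_double:
--             in_single = not in_single
--             buf.append(ch)
--         elif ch == '"' and not in_single:
--             in_double = not in_double
--             buf.append(ch)
--         elif ch == "," and not in_single and not in_double:
--             items.append(_parse_scalar("".join(buf)))
--             buf = []
--         else:
--             buf.append(ch)
--     if buf:
--         items.append(_parse_scalar("".join(buf)))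
--     return items
-- ===== SOURCE B (Python) =====
-- def _strip_inline_comment(raw: str) -> str:
--     """Remove a trailing ` # comment` while respecting quoted regions."""
--     in_single = False
--     in_double = False
--     for i, ch in enumerate(raw):
--         if ch == "'" and not in_double:
--             in_single = not in_single
--         elif ch == '"' and not in_single:
--             in_double = not in_double
--         elif ch == "#" and not in_single and not in_double and (i == 0 or raw[i - 1].isspace()):
--             return raw[:i].rstrip()
--     return raw
--
-- _DOUBLE_QUOTED_ESCAPES: dict[str, str] = {
--     "\\": "\\",
--     '"': '"',
--     "n": "\n",
--     "t": "\t",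
--     "r": "\r",
--     "/": "/",
--     "0": "\x00",
-- }
--
-- def _unescape_double_quoted(inner: str) -> str:
--     """Apply YAML double-quoted escape processing to the inside of a scalar."""
--     if "\\" not in inner:
--         return inner
--     out: list[str] = []
--     i = 0
--     n = len(inner)
--     while i < n:
--         ch = inner[i]
--         if ch == "\\" and i + 1 < n:
--             nxt = inner[i + 1]
--             mapped = _DOUBLE_QUOTED_ESCAPES.get(nxt)
--             if mapped is not None:
--                 out.append(mapped)
--             else:
--                 out.append(ch)
--                 out.append(nxt)
--             i += 2
--             continue
--         out.append(ch)
--         i += 1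
--     return "".join(out)
--
-- def _parse_scalar(raw: str) -> str:
--     """Normalize a scalar value: strip inline comment, then process YAML quote escapes."""
--     raw = _strip_inline_comment(raw).strip()
--     if len(raw) >= 2 and raw[0] == '"' and raw[-1] == '"':
--         return _unescape_double_quoted(raw[1:-1])
--     if len(raw) >= 2 and raw[0] == "'" and raw[-1] == "'":
--         return raw[1:-1].replace("''", "'")
--     return raw
--
-- def _find_top_comma(s: str) -> int:
--     """Index of the first comma outside any quoted span, or -1."""
--     i = 0
--     n = len(s)
--     while i < n:
--         ch = s[i]
--         if ch == "'" or ch == '"':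
--             j = s.find(ch, i + 1)
--             i = n if j == -1 else j + 1
--         elif ch == ",":
--             return i
--         else:
--             i += 1
--     return -1
--
-- def _parse_inline_list(raw: str) -> list[str] | None:
--     """Parse `[a, b, "c"]` into a list of scalars, or return None if not a list."""
--     raw = _strip_inline_comment(raw).strip()
--     if not (raw.startswith("[") and raw.endswith("]")):
--         return None
--     inner = raw[1:-1].strip()
--     if not inner:
--         return []
--     items: list[str] = []
--     rest = inner
--     while True:
--         k = _find_top_comma(rest)
--         if k == -1:
--             break
--         items.append(_parse_scalar(rest[:k]))
--         rest = rest[k + 1:]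
--     if rest:
--         items.append(_parse_scalar(rest))
--     return items
-- ===== Notes on version B (the rewrite author's own statement) =====
-- stated objective: alternative
-- what changed: The top-level split is re-decomposed: instead of one per-char pass maintaining in_single/in_double toggle flags and an accumulating buffer, B repeatedly finds the first top-level comma (skipping each quoted span atomically with str.find of the same quote char) and slices that segment off the remaining string.
import Mathlib
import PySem

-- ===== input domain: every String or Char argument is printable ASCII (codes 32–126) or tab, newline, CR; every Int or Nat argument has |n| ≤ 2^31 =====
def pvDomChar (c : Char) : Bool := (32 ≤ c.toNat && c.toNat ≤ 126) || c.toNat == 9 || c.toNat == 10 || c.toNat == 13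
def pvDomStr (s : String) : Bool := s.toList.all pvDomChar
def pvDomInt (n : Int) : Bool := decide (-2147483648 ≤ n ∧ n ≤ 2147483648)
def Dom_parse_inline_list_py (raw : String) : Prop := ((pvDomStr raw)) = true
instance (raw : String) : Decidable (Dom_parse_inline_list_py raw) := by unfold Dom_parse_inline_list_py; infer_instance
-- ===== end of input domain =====

-- B replaces A's toggle-flag single pass over the inner text by a repeated
-- "find first top-level comma (skipping quoted spans atomically), slice it off"
-- decomposition; same return value, similar cost (objective: alternative).

-- ===== PORT A =====
-- Shared helpers (the same Python helper functions are called by A and by B):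
-- _strip_inline_comment, ported on List Char; acc is raw[:i], prevOk is (i == 0 or raw[i-1].isspace())
def stripInlineCommentLoop (cs : List Char) (prevOk : Bool) (sq dq : Bool) (acc : List Char) (orig : List Char) : List Char :=
  match cs with
  | [] => orig
  | c :: rest =>
    if c == '\'' && !dq then stripInlineCommentLoop rest (PySem.Chars.isspace c) (!sq) dq (acc ++ [c]) orig
    else if c == '"' && !sq then stripInlineCommentLoop rest (PySem.Chars.isspace c) sq (!dq) (acc ++ [c]) orig
    else if c == '#' && !sq && !dq && prevOk then PySem.Chars.rstrip acc
    else stripInlineCommentLoop rest (PySem.Chars.isspace c) sq dq (acc ++ [c]) orig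

def stripInlineComment (cs : List Char) : List Char :=
  stripInlineCommentLoop cs true false false [] cs

-- _DOUBLE_QUOTED_ESCAPES.get, the dict ported as an ordered lookup
def escMap (c : Char) : Option Char :=
  if c == '\\' then some '\\'
  else if c == '"' then some '"'
  else if c == 'n' then some '\n'
  else if c == 't' then some '\t'
  else if c == 'r' then some '\r'
  else if c == '/' then some '/'
  else if c == '0' then some (Char.ofNat 0)
  else none

-- the index loop of _unescape_double_quoted (i advances by 2 on a backslash pair, else by 1)
def unescapeLoop (cs : List Char) : List Char :=
  match cs with
  | [] => []
  | c :: rest =>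
    if c == '\\' then
      match rest with
      | nxt :: rest' =>
        match escMap nxt with
        | some m => m :: unescapeLoop rest'
        | none => c :: nxt :: unescapeLoop rest'
      | [] => c :: unescapeLoop []   -- i + 1 < n fails: append ch, i += 1
    else c :: unescapeLoop rest

def unescapeDoubleQuoted (cs : List Char) : List Char :=
  if PySem.Chars.isIn ['\\'] cs then unescapeLoop cs else cs

-- _parse_scalar (raw[0] / raw[-1] via pyGet?, raw[1:-1] via the Python slice)
def parseScalar (raw : List Char) : List Char :=
  let r := PySem.Chars.strip (stripInlineComment raw)
  if decide (2 ≤ r.length) && (PySem.List.pyGet? r 0 == some '"') && (PySem.List.pyGet? r (-1) == some '"') then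
    unescapeDoubleQuoted (PySem.List.slice r (some 1) (some (-1)))
  else if decide (2 ≤ r.length) && (PySem.List.pyGet? r 0 == some '\'') && (PySem.List.pyGet? r (-1) == some '\'') then
    PySem.Chars.replace (PySem.List.slice r (some 1) (some (-1))) ['\'', '\''] ['\'']
  else r

-- A's per-char loop with in_single/in_double toggle flags and an accumulating buf;
-- _parse_scalar("".join(buf)) is applied at append time, items kept as char lists
def loopA (cs : List Char) (items : List (List Char)) (buf : List Char) (sq dq : Bool) : List (List Char) :=
  match cs with
  | [] => if buf = [] then items else items ++ [parseScalar buf]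
  | c :: rest =>
    if c == '\'' && !dq then loopA rest items (buf ++ [c]) (!sq) dq
    else if c == '"' && !sq then loopA rest items (buf ++ [c]) sq (!dq)
    else if c == ',' && !sq && !dq then loopA rest (items ++ [parseScalar buf]) [] sq dq
    else loopA rest items (buf ++ [c]) sq dq

def parse_inline_list_py (raw : String) : Option (List String) :=
  let r := PySem.Chars.strip (stripInlineComment raw.toList)
  if PySem.Chars.startswith r ['['] && PySem.Chars.endswith r [']'] then
    let inner := PySem.Chars.strip (PySem.List.slice r (some 1) (some (-1)))
    if inner = [] then some []
    else some ((loopA inner [] [] false false).map String.ofList)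
  else none

-- ===== PORT B =====
-- B's _find_top_comma plus the two slices rest[:k] / rest[k+1:] are returned together:
-- none = no top-level comma; some (seg, rest') = the segment before the first top-level
-- comma and the remainder after it.  s.find(ch, i+1) (skip to the SAME quote char,
-- to the end of the string if absent) is ported as takeWhile/dropWhile on that char — exact.
def splitFirst (cs : List Char) : Option (List Char × List Char) :=
  match cs with
  | [] => none
  | c :: rest =>
    if c == ',' then some ([], rest)
    else if c == '\'' || c == '"' then
      match hd : rest.dropWhile (· ≠ c) with
      | [] => none        -- unmatched quote: i jumps to n, scan ends without a comma
      | _ :: tail =>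
        match splitFirst tail with
        | none => none
        | some (a, b) => some (c :: rest.takeWhile (· ≠ c) ++ c :: a, b)
    else
      match splitFirst rest with
      | none => none
      | some (a, b) => some (c :: a, b)
termination_by cs.length
decreasing_by
all_goals
  first
  | (have h1 : (List.dropWhile (· ≠ c) rest).length ≤ rest.length := rest.length_dropWhile_le _
     rw [hd] at h1
     simp at h1 ⊢
     omega)
  | (simp; omega)
  | simp

theorem splitFirst_snd_length : ∀ (n : Nat) (cs : List Char), cs.length ≤ n →
    ∀ {a b : List Char}, splitFirst cs = some (a, b) → b.length < cs.length := by
  intro n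
  induction n with
  | zero =>
    intro cs hle a b hs
    have : cs = [] := List.length_eq_zero_iff.mp (Nat.le_zero.mp hle)
    subst this; simp [splitFirst] at hs
  | succ n ih =>
    intro cs hle a b hs
    match cs with
    | [] => simp [splitFirst] at hs
    | c :: rest =>
      have hle' : rest.length ≤ n := by simpa using hle
      rw [splitFirst] at hs
      split at hs
      · cases hs; simp
      · split at hs
        · split at hs
          · exact absurd hs (by simp)
          · rename_i tail hd
            split at hs
            · exact absurd hs (by simp)
            · rename_i a' b' hsf
              cases hs
              have h1 : (List.dropWhile (· ≠ c) rest).length ≤ rest.length :=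
                rest.length_dropWhile_le _
              rw [hd] at h1
              simp only [List.length_cons] at h1 ⊢
              have h2 := ih tail (by omega) hsf
              omega
        · split at hs
          · exact absurd hs (by simp)
          · rename_i a' b' hsf
            cases hs
            have h2 := ih rest hle' hsf
            simp only [List.length_cons]
            omega

-- B's driver loop: repeatedly split off the segment before the first top-level comma
def loopB (cs : List Char) (items : List (List Char)) : List (List Char) :=
  match hs : splitFirst cs with
  | some (a, b) => loopB b (items ++ [parseScalar a])
  | none => if cs = [] then items else items ++ [parseScalar cs]
termination_by cs.length
decreasing_by exact splitFirst_snd_length cs.length cs (le_refl _) hs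

def parse_inline_list_py_alt (raw : String) : Option (List String) :=
  let r := PySem.Chars.strip (stripInlineComment raw.toList)
  if PySem.Chars.startswith r ['['] && PySem.Chars.endswith r [']'] then
    let inner := PySem.Chars.strip (PySem.List.slice r (some 1) (some (-1)))
    if inner = [] then some []
    else some ((loopB inner []).map String.ofList)
  else none

-- ===== PRECONDITION & SPEC =====
def Spec_parse_inline_list_py (raw : String) (out : Option (List String)) : Prop := out = parse_inline_list_py_alt raw
instance (raw : String) (out : Option (List String)) : Decidable (Spec_parse_inline_list_py raw out) := by unfold Spec_parse_inline_list_py; infer_instance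

-- ===== CLAIM (what is proved, stated in full; the proofs are below) =====
def Claim_equal_parse_inline_list_py : Prop := ∀ (raw : String), Dom_parse_inline_list_py raw → Spec_parse_inline_list_py raw (parse_inline_list_py raw)

-- ===== LEMMAS AND PROOFS =====

-- while in_single (sq = true, dq = false), every char other than a single quote is
-- simply appended to buf
theorem loopA_span_single : ∀ (pre : List Char), (∀ x ∈ pre, x ≠ '\'') →
    ∀ (rest : List Char) (items : List (List Char)) (buf : List Char),
    loopA (pre ++ rest) items buf true false = loopA rest items (buf ++ pre) true false := by
  intro pre
  induction pre with
  | nil => intro _ rest items buf; simp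
  | cons c pre ih =>
    intro h rest items buf
    have hc : c ≠ '\'' := h c (by simp)
    rw [List.cons_append, loopA]
    simp only [hc, beq_iff_eq, if_false, Bool.not_false, Bool.not_true, Bool.and_false,
      Bool.and_true, Bool.false_and, if_neg (by simp [hc] : ¬((c == '\'') && !false) = true),
      if_neg (by simp : ¬((c == '"') && !true) = true),
      if_neg (by simp : ¬((c == ',') && !true && !false) = true)]
    rw [ih (fun x hx => h x (by simp [hx])) rest items (buf ++ [c])]
    simp

-- while in_double (sq = false, dq = true), every char other than a double quote is
-- simply appended to buf
theorem loopA_span_double : ∀ (pre : List Char), (∀ x ∈ pre, x ≠ '"') →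
    ∀ (rest : List Char) (items : List (List Char)) (buf : List Char),
    loopA (pre ++ rest) items buf false true = loopA rest items (buf ++ pre) false true := by
  intro pre
  induction pre with
  | nil => intro _ rest items buf; simp
  | cons c pre ih =>
    intro h rest items buf
    have hc : c ≠ '"' := h c (by simp)
    rw [List.cons_append, loopA]
    simp only [if_neg (by simp : ¬((c == '\'') && !true) = true),
      if_neg (by simp [hc] : ¬((c == '"') && !false) = true),
      if_neg (by simp : ¬((c == ',') && !false && !true) = true)]
    rw [ih (fun x hx => h x (by simp [hx])) rest items (buf ++ [c])]
    simp

theorem dropWhile_ne_head : ∀ (l : List Char) (c q : Char) (tail : List Char),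
    l.dropWhile (· ≠ c) = q :: tail → q = c := by
  intro l c
  induction l with
  | nil => intro q tail h; simp at h
  | cons x l ih =>
    intro q tail h
    by_cases hx : x = c
    · rw [List.dropWhile_cons_of_neg (by simp [hx])] at h
      cases h; exact hx
    · rw [List.dropWhile_cons_of_pos (by simp [hx])] at h
      exact ih q tail h

-- evaluation equations for the well-founded definitions splitFirst and loopB
theorem splitFirst_nil : splitFirst [] = none := by rw [splitFirst]

theorem splitFirst_comma (rest : List Char) : splitFirst (',' :: rest) = some ([], rest) := by
  rw [splitFirst]; simp

theorem splitFirst_quote_nil (c : Char) (rest : List Char) (hq : c = '\'' ∨ c = '"')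
    (h : rest.dropWhile (· ≠ c) = []) : splitFirst (c :: rest) = none := by
  have hc : c ≠ ',' := by rcases hq with h' | h' <;> simp [h']
  rw [splitFirst]
  rw [if_neg (by simp [hc]), if_pos (by rcases hq with h' | h' <;> simp [h'])]
  split
  · rfl
  · rename_i q tail hd
    rw [h] at hd; cases hd

theorem splitFirst_quote_cons' (c q : Char) (rest tail : List Char) (hq : c = '\'' ∨ c = '"')
    (h : rest.dropWhile (· ≠ c) = q :: tail) :
    splitFirst (c :: rest) =
      (match splitFirst tail with
       | none => none
       | some (a, b) => some (c :: rest.takeWhile (· ≠ c) ++ c :: a, b)) := by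
  have hc : c ≠ ',' := by rcases hq with h' | h' <;> simp [h']
  rw [splitFirst]
  rw [if_neg (by simp [hc]), if_pos (by rcases hq with h' | h' <;> simp [h'])]
  split
  · rename_i hd; rw [h] at hd; cases hd
  · rename_i q' tail' hd
    rw [h] at hd
    cases hd
    rfl

theorem splitFirst_other (c : Char) (rest : List Char) (hc : c ≠ ',') (hq : ¬(c = '\'' ∨ c = '"')) :
    splitFirst (c :: rest) =
      (match splitFirst rest with
       | none => none
       | some (a, b) => some (c :: a, b)) := by
  push_neg at hq
  rw [splitFirst]
  rw [if_neg (by simp [hc]), if_neg (by simp [hq.1, hq.2])]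

theorem loopB_none (cs : List Char) (items : List (List Char)) (h : splitFirst cs = none) :
    loopB cs items = if cs = [] then items else items ++ [parseScalar cs] := by
  rw [loopB]
  split <;> rename_i heq
  · rw [h] at heq; cases heq
  · rfl

theorem loopB_some (cs a b : List Char) (items : List (List Char))
    (h : splitFirst cs = some (a, b)) :
    loopB cs items = loopB b (items ++ [parseScalar a]) := by
  rw [loopB]
  split <;> rename_i heq
  · rw [h] at heq; cases heq; rfl
  · rw [h] at heq; cases heq

-- the key invariant: A's toggle loop started at top level with pending buffer buf
-- computes exactly B's split-off-first-segment recursion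
theorem loopA_key : ∀ (n : Nat) (cs : List Char), cs.length ≤ n →
    ∀ (items : List (List Char)) (buf : List Char),
    loopA cs items buf false false =
      (match splitFirst cs with
       | some (a, b) => loopB b (items ++ [parseScalar (buf ++ a)])
       | none => if buf ++ cs = [] then items else items ++ [parseScalar (buf ++ cs)]) := by
  intro n
  induction n with
  | zero =>
    intro cs hle items buf
    have : cs = [] := List.length_eq_zero_iff.mp (Nat.le_zero.mp hle)
    subst this
    rw [splitFirst_nil]
    simp [loopA]
  | succ n ih =>
    intro cs hle items buf
    match cs with
    | [] => rw [splitFirst_nil]; simp [loopA]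
    | c :: rest =>
      have hle' : rest.length ≤ n := by simpa using hle
      by_cases hc : c = ','
      · -- top-level comma: both sides close the current segment
        subst hc
        rw [splitFirst_comma]
        show loopA (',' :: rest) items buf false false =
          loopB rest (items ++ [parseScalar (buf ++ [])])
        rw [loopA, if_neg (by decide), if_neg (by decide), if_pos (by decide)]
        rw [ih rest hle' (items ++ [parseScalar buf]) []]
        cases h2 : splitFirst rest with
        | none =>
          rw [loopB_none rest _ h2]
          by_cases hr : rest = [] <;> simp [hr]
        | some ab =>
          obtain ⟨a, b⟩ := ab
          rw [loopB_some rest a b _ h2]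
          simp
      · by_cases hq : c = '\'' ∨ c = '"'
        · -- quote: A toggles into the quoted state and appends every char up to the
          -- matching quote (if any); B skips the whole span at once
          rcases hq with hq | hq
          · subst hq
            cases hpost : rest.dropWhile (· ≠ '\'') with
            | nil =>
              -- no matching quote: the rest of the input is swallowed into buf
              rw [splitFirst_quote_nil '\'' rest (Or.inl rfl) hpost]
              show loopA ('\'' :: rest) items buf false false =
                if buf ++ '\'' :: rest = [] then items else items ++ [parseScalar (buf ++ '\'' :: rest)]
              rw [loopA, if_pos (by decide)]
              show loopA rest items (buf ++ ['\'']) true false = _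
              have hall : ∀ x ∈ rest, x ≠ '\'' := by
                intro x hx
                have := List.dropWhile_eq_nil_iff.mp hpost x hx
                simpa using this
              have hs := loopA_span_single rest hall [] items (buf ++ ['\''])
              simp only [List.append_nil] at hs
              rw [hs, loopA]
              simp
            | cons q tail =>
              have hqc : q = '\'' := dropWhile_ne_head rest '\'' q tail hpost
              subst hqc
              rw [splitFirst_quote_cons' '\'' '\'' rest tail (Or.inl rfl) hpost]
              obtain ⟨pre, hpre, hrest, htw⟩ :
                  ∃ pre, (∀ x ∈ pre, x ≠ '\'') ∧ rest = pre ++ '\'' :: tail ∧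
                    rest.takeWhile (· ≠ '\'') = pre := by
                refine ⟨rest.takeWhile (· ≠ '\''), ?_, ?_, rfl⟩
                · intro x hx
                  have := List.mem_takeWhile_imp hx
                  simpa using this
                · conv_lhs => rw [← List.takeWhile_append_dropWhile
                    (p := fun x => decide (x ≠ '\'')) (l := rest)]
                  rw [hpost]
              rw [htw]
              have hlen : tail.length ≤ n := by
                rw [hrest] at hle'; simp at hle'; omega
              rw [loopA, if_pos (by decide)]
              show loopA rest items (buf ++ ['\'']) true false = _
              conv_lhs => rw [hrest]
              rw [loopA_span_single pre hpre ('\'' :: tail) items (buf ++ ['\''])]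
              rw [loopA, if_pos (by decide)]
              show loopA tail items (((buf ++ ['\'']) ++ pre) ++ ['\'']) false false = _
              rw [ih tail hlen items _]
              cases h2 : splitFirst tail with
              | none => simp [hrest]
              | some ab =>
                obtain ⟨a, b⟩ := ab
                simp
          · subst hq
            cases hpost : rest.dropWhile (· ≠ '"') with
            | nil =>
              rw [splitFirst_quote_nil '"' rest (Or.inr rfl) hpost]
              show loopA ('"' :: rest) items buf false false =
                if buf ++ '"' :: rest = [] then items else items ++ [parseScalar (buf ++ '"' :: rest)]
              rw [loopA, if_neg (by decide), if_pos (by decide)]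
              show loopA rest items (buf ++ ['"']) false true = _
              have hall : ∀ x ∈ rest, x ≠ '"' := by
                intro x hx
                have := List.dropWhile_eq_nil_iff.mp hpost x hx
                simpa using this
              have hs := loopA_span_double rest hall [] items (buf ++ ['"'])
              simp only [List.append_nil] at hs
              rw [hs, loopA]
              simp
            | cons q tail =>
              have hqc : q = '"' := dropWhile_ne_head rest '"' q tail hpost
              subst hqc
              rw [splitFirst_quote_cons' '"' '"' rest tail (Or.inr rfl) hpost]
              obtain ⟨pre, hpre, hrest, htw⟩ :
                  ∃ pre, (∀ x ∈ pre, x ≠ '"') ∧ rest = pre ++ '"' :: tail ∧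
                    rest.takeWhile (· ≠ '"') = pre := by
                refine ⟨rest.takeWhile (· ≠ '"'), ?_, ?_, rfl⟩
                · intro x hx
                  have := List.mem_takeWhile_imp hx
                  simpa using this
                · conv_lhs => rw [← List.takeWhile_append_dropWhile
                    (p := fun x => decide (x ≠ '"')) (l := rest)]
                  rw [hpost]
              rw [htw]
              have hlen : tail.length ≤ n := by
                rw [hrest] at hle'; simp at hle'; omega
              rw [loopA, if_neg (by decide), if_pos (by decide)]
              show loopA rest items (buf ++ ['"']) false true = _
              conv_lhs => rw [hrest]
              rw [loopA_span_double pre hpre ('"' :: tail) items (buf ++ ['"'])]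
              rw [loopA, if_neg (by decide), if_pos (by decide)]
              show loopA tail items (((buf ++ ['"']) ++ pre) ++ ['"']) false false = _
              rw [ih tail hlen items _]
              cases h2 : splitFirst tail with
              | none => simp [hrest]
              | some ab =>
                obtain ⟨a, b⟩ := ab
                simp
        · -- ordinary char: both sides carry it into the current segment
          rw [splitFirst_other c rest hc hq]
          push_neg at hq
          rw [loopA, if_neg (by simp [hq.1]), if_neg (by simp [hq.2]), if_neg (by simp [hc])]
          rw [ih rest hle' items (buf ++ [c])]
          cases h2 : splitFirst rest with
          | none => simp
          | some ab =>
            obtain ⟨a, b⟩ := ab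
            simp

theorem loopA_eq_loopB (cs : List Char) (items : List (List Char)) :
    loopA cs items [] false false = loopB cs items := by
  rw [loopA_key cs.length cs (le_refl _) items [], loopB]
  cases hs : splitFirst cs with
  | none => simp
  | some ab => cases ab; simp

-- ===== VERDICT (by name: the statement is the Claim_ definition above) =====
theorem parse_inline_list_py_spec : Claim_equal_parse_inline_list_py := by
  intro raw _
  unfold Spec_parse_inline_list_py parse_inline_list_py parse_inline_list_py_alt
  simp only [loopA_eq_loopB]
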